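-- pv_equiv track=rewrite | github.com/mfiloramo/Python-Practice | Practice/challenges.py | all_the_letters
-- ===== SOURCE A (Python) =====
-- def all_the_letters(word_1, word_2):
--     """
--     Takes in two words as input and returns a list of three elements:
--         (1) Shared letters between two words.
--         (2) Letters unique to word 1.
--         (3) Letters unique to word 2.
--     Each element should have unique letters, and have each letter be alphabetically sorted.
--     """
--     letters_list = []
--     word_lists = ["", "", ""]
--
--     for x in word_1:
--         for y in word_2:
--
--             # Shared letter sorting:
--             if x in word_1 and x in word_2 and x not in word_lists[0]:
--                 word_lists[0] += x
--
--             # Unique letters in word 1 sorting: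
--             if x in word_1 and x not in word_2 and x not in word_lists[1]:
--                 word_lists[1] += x
--
--             # Unique letters in word 2 sorting:
--             if y in word_2 and y not in word_1 and y not in word_lists[2]:
--                 word_lists[2] += y
--
--     # Adding alphabetized sets of letters to the output list:
--     for i in word_lists:
--         i = sorted(i)
--         letters_list.append("".join(i))
--
--     return letters_list
-- ===== SOURCE B (Python) =====
-- def all_the_letters(word_1, word_2):
--     if not word_1 or not word_2:
--         return ["", "", ""]
--     letters = sorted(set(word_1) | set(word_2))
--     shared, only_1, only_2 = [], [], []
--     for c in letters:
--         if c in word_1 and c in word_2: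
--             shared.append(c)
--         elif c in word_1:
--             only_1.append(c)
--         else:
--             only_2.append(c)
--     return ["".join(shared), "".join(only_1), "".join(only_2)]
-- ===== Notes on version B (the rewrite author's own statement) =====
-- stated objective: faster
-- what changed: A's nested loops over both words with repeated membership/dedup scans are replaced by a guard for the empty-word case (where A returns ['','','']) plus one classifying pass over the sorted deduplicated union of the two words' letters, appending each letter to the shared/unique-1/unique-2 bucket it belongs to.
import Mathlib
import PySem

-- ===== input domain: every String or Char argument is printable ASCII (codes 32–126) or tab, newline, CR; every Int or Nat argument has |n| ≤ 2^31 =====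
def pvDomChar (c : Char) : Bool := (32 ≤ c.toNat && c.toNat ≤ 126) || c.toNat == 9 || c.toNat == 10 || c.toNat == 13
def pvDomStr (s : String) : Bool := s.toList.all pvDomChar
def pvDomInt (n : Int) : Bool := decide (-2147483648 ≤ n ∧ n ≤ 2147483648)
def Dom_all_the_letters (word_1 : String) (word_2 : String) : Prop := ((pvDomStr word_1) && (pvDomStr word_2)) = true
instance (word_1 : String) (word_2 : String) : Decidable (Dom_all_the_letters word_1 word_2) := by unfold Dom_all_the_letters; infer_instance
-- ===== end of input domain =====

-- B replaces A's nested O(n·m) membership-scanning loops by one classifying pass over the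
-- sorted deduplicated union of the letters (objective: faster / simpler single pass).

-- ===== PORT A =====
-- inner loop body of A ('x in word_1' on a single char x is char membership, exact here)
def atlInner (w1 w2 : List Char) (x : Char) (st : List Char × List Char × List Char)
    (y : Char) : List Char × List Char × List Char :=
  let st0 := if x ∈ w1 ∧ x ∈ w2 ∧ x ∉ st.1 then (st.1 ++ [x], st.2.1, st.2.2) else st
  let st1 := if x ∈ w1 ∧ x ∉ w2 ∧ x ∉ st0.2.1 then (st0.1, st0.2.1 ++ [x], st0.2.2) else st0
  if y ∈ w2 ∧ y ∉ w1 ∧ y ∉ st1.2.2 then (st1.1, st1.2.1, st1.2.2 ++ [y]) else st1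

def all_the_letters (word_1 : String) (word_2 : String) : List String :=
  let w1 := word_1.toList
  let w2 := word_2.toList
  let wl := w1.foldl (fun st x => w2.foldl (atlInner w1 w2 x) st)
      (([] : List Char), ([] : List Char), ([] : List Char))
  [wl.1, wl.2.1, wl.2.2].map (fun i => String.ofList (PySem.List.sorted i (fun c => c) false))

-- ===== PORT B =====
def altStep (w1 w2 : List Char) (acc : List Char × List Char × List Char)
    (c : Char) : List Char × List Char × List Char :=
  if c ∈ w1 ∧ c ∈ w2 then (acc.1 ++ [c], acc.2.1, acc.2.2)
  else if c ∈ w1 then (acc.1, acc.2.1 ++ [c], acc.2.2)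
  else (acc.1, acc.2.1, acc.2.2 ++ [c])

def all_the_letters_alt (word_1 : String) (word_2 : String) : List String :=
  if word_1.toList = [] ∨ word_2.toList = [] then ["", "", ""] else
  let w1 := word_1.toList
  let w2 := word_2.toList
  let letters := PySem.List.sorted ((PySem.Set.ofList w1).union (PySem.Set.ofList w2)) (fun c => c) false
  let r := letters.foldl (altStep w1 w2)
      (([] : List Char), ([] : List Char), ([] : List Char))
  [String.ofList r.1, String.ofList r.2.1, String.ofList r.2.2]

-- ===== PRECONDITION & SPEC =====
def Spec_all_the_letters (word_1 : String) (word_2 : String) (out : List String) : Prop :=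
  out = all_the_letters_alt word_1 word_2
instance (word_1 : String) (word_2 : String) (out : List String) :
    Decidable (Spec_all_the_letters word_1 word_2 out) := by
  unfold Spec_all_the_letters; infer_instance

-- ===== CLAIM (what is proved, stated in full; the proofs are below) =====
def Claim_equal_all_the_letters : Prop := ∀ (word_1 : String) (word_2 : String), Dom_all_the_letters word_1 word_2 → Spec_all_the_letters word_1 word_2 (all_the_letters word_1 word_2)

-- ===== LEMMAS AND PROOFS =====

-- B's single pass splits the letters into the three filters.
theorem altStep_foldl (w1 w2 : List Char) (ls : List Char) (acc : List Char × List Char × List Char) :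
    ls.foldl (altStep w1 w2) acc =
      (acc.1 ++ ls.filter (fun c => decide (c ∈ w1) && decide (c ∈ w2)),
       acc.2.1 ++ ls.filter (fun c => decide (c ∈ w1) && !decide (c ∈ w2)),
       acc.2.2 ++ ls.filter (fun c => !decide (c ∈ w1))) := by
  induction ls generalizing acc with
  | nil => simp
  | cons c t ih =>
    by_cases h1 : c ∈ w1 <;> by_cases h2 : c ∈ w2 <;>
      simp [altStep, List.filter_cons, h1, h2, ih]

theorem nodup_append_singleton {b : List Char} {x : Char} (hb : b.Nodup) (hx : x ∉ b) :
    (b ++ [x]).Nodup := by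
  simp [List.nodup_append, hb]
  exact fun a ha h' => hx (h' ▸ ha)

-- A's third-bucket accumulator.
def addY (w1 w2 : List Char) (b : List Char) (y : Char) : List Char :=
  if y ∈ w2 ∧ y ∉ w1 ∧ y ∉ b then b ++ [y] else b

theorem mem_addY_foldl (w1 w2 : List Char) (ys : List Char) (b : List Char) (c : Char) :
    c ∈ ys.foldl (addY w1 w2) b ↔ c ∈ b ∨ (c ∈ ys ∧ c ∈ w2 ∧ c ∉ w1) := by
  induction ys generalizing b with
  | nil => simp
  | cons y t ih =>
    simp only [List.foldl_cons, ih, addY]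
    split_ifs with h <;> simp_all <;> by_cases hc : c = y <;> simp_all <;> tauto

theorem nodup_addY_foldl (w1 w2 : List Char) (ys : List Char) (b : List Char)
    (hb : b.Nodup) : (ys.foldl (addY w1 w2) b).Nodup := by
  induction ys generalizing b with
  | nil => exact hb
  | cons y t ih =>
    simp only [List.foldl_cons, addY]
    split_ifs with h
    · exact ih _ (nodup_append_singleton hb h.2.2)
    · exact ih _ hb

-- A's inner loop over a nonempty ys, with x coming from word_1.
theorem atlInner_foldl (w1 w2 : List Char) (x : Char) (hx : x ∈ w1)
    (ys : List Char) (hys : ys ≠ []) (st : List Char × List Char × List Char) :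
    ys.foldl (atlInner w1 w2 x) st =
      (if x ∈ w2 ∧ x ∉ st.1 then st.1 ++ [x] else st.1,
       if x ∉ w2 ∧ x ∉ st.2.1 then st.2.1 ++ [x] else st.2.1,
       ys.foldl (addY w1 w2) st.2.2) := by
  induction ys generalizing st with
  | nil => exact absurd rfl hys
  | cons y t ih =>
    rcases eq_or_ne t [] with rfl | ht
    · simp only [List.foldl_cons, List.foldl_nil, atlInner, addY, hx, true_and]
      by_cases h2 : x ∈ w2 <;> by_cases h0 : x ∈ st.1 <;> by_cases h1 : x ∈ st.2.1 <;>
        simp [h2, h0, h1] <;> split_ifs <;> simp_all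
    · simp only [List.foldl_cons, ih ht]
      have hstep : atlInner w1 w2 x st y =
          (if x ∈ w2 ∧ x ∉ st.1 then st.1 ++ [x] else st.1,
           if x ∉ w2 ∧ x ∉ st.2.1 then st.2.1 ++ [x] else st.2.1,
           addY w1 w2 st.2.2 y) := by
        simp only [atlInner, addY, hx, true_and]
        by_cases h2 : x ∈ w2 <;> by_cases h0 : x ∈ st.1 <;> by_cases h1 : x ∈ st.2.1 <;>
          simp [h2, h0, h1] <;> split_ifs <;> simp_all
      rw [hstep]
      congr 1
      · by_cases h2 : x ∈ w2 <;> by_cases h0 : x ∈ st.1 <;> simp [h2, h0]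
      · congr 1
        by_cases h2 : x ∈ w2 <;> by_cases h1 : x ∈ st.2.1 <;> simp [h2, h1]

-- A's outer loop: nodup and membership of all three buckets.
theorem atl_outer (w1 w2 : List Char) (hw2 : w2 ≠ []) (xs : List Char)
    (hxs : ∀ c ∈ xs, c ∈ w1) (st : List Char × List Char × List Char)
    (h0 : st.1.Nodup) (h1 : st.2.1.Nodup) (h2 : st.2.2.Nodup) :
    let res := xs.foldl (fun st x => w2.foldl (atlInner w1 w2 x) st) st
    res.1.Nodup ∧ (∀ c, c ∈ res.1 ↔ c ∈ st.1 ∨ (c ∈ xs ∧ c ∈ w2)) ∧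
    res.2.1.Nodup ∧ (∀ c, c ∈ res.2.1 ↔ c ∈ st.2.1 ∨ (c ∈ xs ∧ c ∉ w2)) ∧
    res.2.2.Nodup ∧ (∀ c, c ∈ res.2.2 ↔ c ∈ st.2.2 ∨ (xs ≠ [] ∧ c ∈ w2 ∧ c ∉ w1)) := by
  induction xs generalizing st with
  | nil => simp [h0, h1, h2]
  | cons x t ih =>
    intro res
    have hx : x ∈ w1 := hxs x (by simp)
    have hstep := atlInner_foldl w1 w2 x hx w2 hw2 st
    have hres : res = t.foldl (fun st x => w2.foldl (atlInner w1 w2 x) st)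
        (w2.foldl (atlInner w1 w2 x) st) := by simp [res]
    set st' := w2.foldl (atlInner w1 w2 x) st with hst'
    have e0 : st'.1 = if x ∈ w2 ∧ x ∉ st.1 then st.1 ++ [x] else st.1 := by rw [hstep]
    have e1 : st'.2.1 = if x ∉ w2 ∧ x ∉ st.2.1 then st.2.1 ++ [x] else st.2.1 := by rw [hstep]
    have e2 : st'.2.2 = w2.foldl (addY w1 w2) st.2.2 := by rw [hstep]
    have hn0 : st'.1.Nodup := by
      rw [e0]; split_ifs with h
      · exact nodup_append_singleton h0 h.2
      · exact h0
    have hn1 : st'.2.1.Nodup := by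
      rw [e1]; split_ifs with h
      · exact nodup_append_singleton h1 h.2
      · exact h1
    have hn2 : st'.2.2.Nodup := by rw [e2]; exact nodup_addY_foldl w1 w2 w2 st.2.2 h2
    have hm0 : ∀ c, c ∈ st'.1 ↔ c ∈ st.1 ∨ (c = x ∧ c ∈ w2) := by
      intro c; rw [e0]; split_ifs with h <;> by_cases hc : c = x <;>
        simp only [List.mem_append, List.mem_singleton, hc] <;> (try push_neg at h) <;> tauto
    have hm1 : ∀ c, c ∈ st'.2.1 ↔ c ∈ st.2.1 ∨ (c = x ∧ c ∉ w2) := by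
      intro c; rw [e1]; split_ifs with h <;> by_cases hc : c = x <;>
        simp only [List.mem_append, List.mem_singleton, hc] <;> (try push_neg at h) <;> tauto
    have hm2 : ∀ c, c ∈ st'.2.2 ↔ c ∈ st.2.2 ∨ (c ∈ w2 ∧ c ∉ w1) := by
      intro c; rw [e2]; rw [mem_addY_foldl]; tauto
    obtain ⟨r0, r0m, r1, r1m, r2, r2m⟩ :=
      ih (fun c hc => hxs c (by simp [hc])) st' hn0 hn1 hn2
    rw [hres]
    refine ⟨r0, ?_, r1, ?_, r2, ?_⟩
    · intro c; rw [r0m c, hm0 c]; by_cases hc : c = x <;> simp [hc] <;> tauto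
    · intro c; rw [r1m c, hm1 c]; by_cases hc : c = x <;> simp [hc] <;> tauto
    · intro c; rw [r2m c, hm2 c]
      rcases eq_or_ne t [] with rfl | ht
      · simp
      · simp [ht]

-- sorted of a nodup list (identity key) is strictly increasing
theorem sorted_nodup_pairwise_lt (xs : List Char) (h : xs.Nodup) :
    (PySem.List.sorted xs (fun c => c) false).Pairwise (· < ·) := by
  have hle := PySem.List.sorted_pairwise xs (fun c => c) 
  have hnd : (PySem.List.sorted xs (fun c => c) false).Nodup :=
    (PySem.List.sorted_perm xs (fun c => c) false).nodup_iff.mpr h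
  exact (hle.and hnd).imp (fun h => lt_of_le_of_ne h.1 h.2)

-- the B-side letters list
theorem bucket_eq (w1 w2 b : List Char) (f : Char → Bool) (hnd : b.Nodup)
    (hmem : ∀ c, c ∈ b ↔ (c ∈ w1 ∨ c ∈ w2) ∧ f c = true) :
    PySem.List.sorted b (fun c => c) false =
      (PySem.List.sorted ((PySem.Set.ofList w1).union (PySem.Set.ofList w2)) (fun c => c) false).filter f := by
  set L := PySem.List.sorted ((PySem.Set.ofList w1).union (PySem.Set.ofList w2)) (fun c => c) false with hL
  have hLnd : L.Nodup :=
    (PySem.List.sorted_perm _ _ _).nodup_iff.mpr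
      (PySem.Set.nodup_union _ _ (PySem.Set.nodup_ofList w1))
  have hLlt : L.Pairwise (· < ·) :=
    sorted_nodup_pairwise_lt _ (PySem.Set.nodup_union _ _ (PySem.Set.nodup_ofList w1))
  have hLmem : ∀ c, c ∈ L ↔ c ∈ w1 ∨ c ∈ w2 := by
    intro c
    rw [hL, PySem.List.mem_sorted, PySem.Set.mem_union, PySem.Set.mem_ofList, PySem.Set.mem_ofList]
  have hfnd : (L.filter f).Nodup := hLnd.filter _
  have hperm : (L.filter f).Perm b := by
    rw [List.perm_ext_iff_of_nodup hfnd hnd]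
    intro c
    rw [List.mem_filter, hmem c, hLmem c]
  have hflt : (L.filter f).Pairwise (· < ·) := hLlt.sublist (List.filter_sublist (l := L))
  exact PySem.List.sorted_eq_of_perm_of_pairwise_lt b (L.filter f) (fun c => c) hperm hflt

-- main agreement on both-nonempty inputs
theorem agree_nonempty (word_1 word_2 : String)
    (h1 : word_1.toList ≠ []) (h2 : word_2.toList ≠ []) :
    all_the_letters word_1 word_2 = all_the_letters_alt word_1 word_2 := by
  set w1 := word_1.toList
  set w2 := word_2.toList
  obtain ⟨r0, r0m, r1, r1m, r2, r2m⟩ :=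
    atl_outer w1 w2 h2 w1 (fun c hc => hc) ([], [], []) (by simp) (by simp) (by simp)
  simp only [all_the_letters, all_the_letters_alt]
  rw [if_neg (by rw [not_or]; exact ⟨h1, h2⟩)]
  rw [altStep_foldl]
  simp only [List.map_cons, List.map_nil, List.nil_append]
  refine congrArg₂ _ (congrArg _ ?_) (congrArg₂ _ (congrArg _ ?_) (congrArg₂ _ (congrArg _ ?_) rfl))
  · refine bucket_eq w1 w2 _ _ r0 ?_
    intro c; rw [r0m c]; simp; tauto
  · refine bucket_eq w1 w2 _ _ r1 ?_
    intro c; rw [r1m c]; simp; tauto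
  · refine bucket_eq w1 w2 _ _ r2 ?_
    intro c; rw [r2m c]; simp [h1]; tauto

-- A returns ['','',''] whenever either word is empty (its nested loops never execute)
theorem a_empty_left (word_1 word_2 : String) (h1 : word_1.toList = []) :
    all_the_letters word_1 word_2 = ["", "", ""] := by
  simp [all_the_letters, h1, PySem.List.sorted]

theorem a_empty_right (word_1 word_2 : String) (h2 : word_2.toList = []) :
    all_the_letters word_1 word_2 = ["", "", ""] := by
  simp [all_the_letters, h2, List.foldl_fixed, PySem.List.sorted]

-- ===== VERDICT (by name: the statement is the Claim_ definition above) =====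
theorem all_the_letters_spec : Claim_equal_all_the_letters := by
  intro word_1 word_2 _
  unfold Spec_all_the_letters
  rcases eq_or_ne word_1.toList [] with h1 | h1
  · rw [a_empty_left word_1 word_2 h1, all_the_letters_alt, if_pos (Or.inl h1)]
  · rcases eq_or_ne word_2.toList [] with h2 | h2
    · rw [a_empty_right word_1 word_2 h2, all_the_letters_alt, if_pos (Or.inr h2)]
    · exact agree_nonempty word_1 word_2 h1 h2
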